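-- pv_equiv track=rewrite | github.com/jkky-98/programmers | 프로그래머스/2/150368. 이모티콘 할인행사/이모티콘 할인행사.py | solution
-- ===== SOURCE A (Python) =====
-- from itertools import product
--
-- def solution(users, emoticons):
--     rate = [10, 20, 30, 40] # 가능한 할인율
--
--     repeat_n = len(emoticons)
--
--     rate_lst = list(product(rate, repeat = repeat_n)) # 할인율 조합 리스트 만들기
--
--     case_lst = [] # rate별 케이스 모을 곳
--     for rate in rate_lst:
--         emo_plus = 0
--         emo_purchase = 0
--
--         for user in users:
--
--             customer_rate = user[0]
--             customer_price = user[1]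
--
--             # 할인율에 따른 emoticon 가격 리스트
--             price_lst = [int(emoticons[i] * (100 - rate[i]) / 100)
--                          for i in range(len(rate))]
--             purchase = []
--
--
--             for rate_ in rate: # 고객이 살 것에 대한 리스트 0과 1로 나타내기
--                 if rate_ >= customer_rate: # 고객이 구매할 경우
--                     purchase.append(1)
--                 else: # 고객이 구매 안할 경우
--                     purchase.append(0)
--
--             # 실제로 고객이 구매할 물건별 결제 가격
--             total_purchase = [purchase[i] * price_lst[i]
--                               for i in range(len(price_lst))]
--
--             cond = sum(total_purchase) # rate경우의 수에 따른 고객의 전체 구매 가격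
--
--             if cond >= customer_price: # 가격을 기준으로 카운트
--                 emo_plus += 1
--             else:
--                 emo_purchase += cond
--
--         case_lst.append([emo_plus, emo_purchase])
--
--     case_lst.sort(key= lambda x : (x[0], x[1]), reverse=True)
--     return case_lst[0]
-- ===== SOURCE B (Python) =====
-- def solution(users, emoticons):
--     # Running lexicographic best over a recursive enumeration of rate
--     # combinations; prices computed once per combination; no list, no sort.
--     best = None
--
--     def go(i, chosen):
--         nonlocal best
--         if i == len(emoticons):
--             prices = [int(emoticons[j] * (100 - chosen[j]) / 100)
--                       for j in range(len(chosen))]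
--             plus = 0
--             revenue = 0
--             for user in users:
--                 cost = 0
--                 for j in range(len(prices)):
--                     if chosen[j] >= user[0]:
--                         cost += prices[j]
--                 if cost >= user[1]:
--                     plus += 1
--                 else:
--                     revenue += cost
--             if best is None or (plus, revenue) > best:
--                 best = (plus, revenue)
--             return
--         for r in (10, 20, 30, 40):
--             go(i + 1, chosen + [r])
--
--     go(0, [])
--     return [best[0], best[1]]
-- ===== Notes on version B (the rewrite author's own statement) =====
-- stated objective: simpler
-- what changed: B enumerates the rate combinations recursively and keeps a single running lexicographic best pair (computing the discounted price list once per combination), instead of A's building a list of all 4^n cases, re-deriving the price list per user, and sorting the list descending to take its head.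
import Mathlib
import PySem

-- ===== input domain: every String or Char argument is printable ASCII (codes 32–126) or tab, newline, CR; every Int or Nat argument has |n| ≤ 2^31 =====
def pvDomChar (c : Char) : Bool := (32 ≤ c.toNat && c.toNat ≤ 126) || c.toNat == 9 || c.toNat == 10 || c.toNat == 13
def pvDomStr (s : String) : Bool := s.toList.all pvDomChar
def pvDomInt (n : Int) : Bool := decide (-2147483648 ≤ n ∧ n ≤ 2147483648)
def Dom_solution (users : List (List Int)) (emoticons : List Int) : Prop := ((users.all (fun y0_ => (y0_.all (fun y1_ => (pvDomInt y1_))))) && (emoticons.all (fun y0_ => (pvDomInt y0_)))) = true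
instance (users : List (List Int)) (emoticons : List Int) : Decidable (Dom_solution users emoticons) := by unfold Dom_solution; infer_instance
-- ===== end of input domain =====

-- B replaces A's collect-all-cases list and descending sort by a recursive
-- enumeration of the 4^n rate combinations with a single running
-- lexicographic best pair (prices computed once per combination): simpler.
-- (Equal value pairs make max and sort-then-head agree.)

-- ===== PORT A =====
-- itertools.product([10,20,30,40], repeat=n), in CPython's order (first slot slowest)
def pyProductRepeat (xs : List Int) : Nat → List (List Int)
  | 0 => [[]]
  | n + 1 => xs.flatMap (fun r => (pyProductRepeat xs n).map (fun t => r :: t))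

-- the body of A's 'for rate in rate_lst' loop: one [emo_plus, emo_purchase] case
def solCase (users : List (List Int)) (emoticons : List Int) (rate : List Int) : List Int :=
  let acc := users.foldl (fun (acc : Int × Int) user =>
    let customer_rate := PySem.List.pyGetD user 0 0
    let customer_price := PySem.List.pyGetD user 1 0
    let price_lst := (List.range rate.length).map (fun (i : Nat) =>
      PySem.Int.truncdiv (PySem.List.pyGetD emoticons (i : Int) 0 * (100 - PySem.List.pyGetD rate (i : Int) 0)) 100)
    let purchase := rate.foldl (fun purchase rate_ =>
      if rate_ ≥ customer_rate then purchase ++ [(1 : Int)] else purchase ++ [(0 : Int)]) []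
    let total_purchase := (List.range price_lst.length).map (fun (i : Nat) =>
      PySem.List.pyGetD purchase (i : Int) 0 * PySem.List.pyGetD price_lst (i : Int) 0)
    let cond := total_purchase.sum
    if cond ≥ customer_price then (acc.1 + 1, acc.2) else (acc.1, acc.2 + cond)) (0, 0)
  [acc.1, acc.2]

def solution (users : List (List Int)) (emoticons : List Int) : List Int :=
  let rate : List Int := [10, 20, 30, 40]
  let repeat_n := emoticons.length
  let rate_lst := pyProductRepeat rate repeat_n
  let case_lst := rate_lst.foldl (fun case_lst rate => case_lst ++ [solCase users emoticons rate]) []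
  -- case_lst.sort(key=lambda x: (x[0], x[1]), reverse=True); tuple comparison is lexicographic = Lex (Int × Int).
  -- Hand-ported as a stable mergesort descending by that key: exact for THIS sort because every
  -- element is [key.1, key.2], so elements with equal keys are identical lists and any stable or
  -- unstable sort in this order returns exactly CPython's list. (PySem.List.sorted is not usable
  -- here: its insertion sort overflows the evaluator's stack on the 4^7-element case lists.)
  let sorted := case_lst.mergeSort (fun a b =>
    decide (toLex (PySem.List.pyGetD b 0 0, PySem.List.pyGetD b 1 0)
      ≤ toLex (PySem.List.pyGetD a 0 0, PySem.List.pyGetD a 1 0)))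
  -- case_lst[0]: case_lst is never empty (product yields ≥ 1 combination)
  sorted.headD []

-- ===== PORT B =====
def solAltPrices (emoticons chosen : List Int) : List Int :=
  (List.range chosen.length).map (fun (j : Nat) =>
    PySem.Int.truncdiv (PySem.List.pyGetD emoticons (j : Int) 0 * (100 - PySem.List.pyGetD chosen (j : Int) 0)) 100)

def solAltEval (users : List (List Int)) (emoticons chosen : List Int) : Int × Int :=
  let prices := solAltPrices emoticons chosen
  users.foldl (fun (acc : Int × Int) user =>
    let cost := (List.range prices.length).foldl (fun (c : Int) (j : Nat) =>
      if PySem.List.pyGetD chosen (j : Int) 0 ≥ PySem.List.pyGetD user 0 0 then c + PySem.List.pyGetD prices (j : Int) 0 else c) 0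
    if cost ≥ PySem.List.pyGetD user 1 0 then (acc.1 + 1, acc.2) else (acc.1, acc.2 + cost)) (0, 0)

-- 'if best is None or (plus, revenue) > best: best = (plus, revenue)'
def solAltStep (best : Option (Int × Int)) (p : Int × Int) : Option (Int × Int) :=
  match best with
  | none => some p
  | some b => if b.1 < p.1 ∨ (b.1 = p.1 ∧ b.2 < p.2) then some p else some b

-- Source B's go(i, chosen); the fuel argument is len(emoticons) - i
def solAltGo (users : List (List Int)) (emoticons : List Int) : Nat → List Int → Option (Int × Int) → Option (Int × Int)
  | 0, chosen, best => solAltStep best (solAltEval users emoticons chosen)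
  | n + 1, chosen, best =>
      ([10, 20, 30, 40] : List Int).foldl (fun b r => solAltGo users emoticons n (chosen ++ [r]) b) best

def solution_alt (users : List (List Int)) (emoticons : List Int) : List Int :=
  match solAltGo users emoticons emoticons.length [] none with
  | some p => [p.1, p.2]
  | none => []  -- unreachable: go always reaches at least one leaf, so best is never None

-- ===== PRECONDITION & SPEC =====
-- Pre_ excludes inputs where some user row has fewer than two entries: there
-- Python A raises IndexError on user[0]/user[1] (and B raises too).
def Pre_solution (users : List (List Int)) (emoticons : List Int) : Prop :=
  ∀ u ∈ users, 2 ≤ u.length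
instance (users : List (List Int)) (emoticons : List Int) : Decidable (Pre_solution users emoticons) := by unfold Pre_solution; infer_instance

def pvWitness_solution : List (List Int) × List Int := ([[30, 5000], [40, 1000]], [2000, 3000])

def Spec_solution (users : List (List Int)) (emoticons : List Int) (out : List Int) : Prop := out = solution_alt users emoticons
instance (users : List (List Int)) (emoticons : List Int) (out : List Int) : Decidable (Spec_solution users emoticons out) := by unfold Spec_solution; infer_instance

-- ===== CLAIM (what is proved, stated in full; the proofs are below) =====
def Claim_equal_solution : Prop := ∀ (users : List (List Int)) (emoticons : List Int), Dom_solution users emoticons → Pre_solution users emoticons → Spec_solution users emoticons (solution users emoticons)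

-- ===== LEMMAS AND PROOFS =====

theorem my_foldl_congr {α β : Type} (xs : List α) (f g : β → α → β) (b : β)
    (h : ∀ b x, x ∈ xs → f b x = g b x) : xs.foldl f b = xs.foldl g b := by
  induction xs generalizing b with
  | nil => rfl
  | cons x xs ih =>
      simp only [List.foldl_cons]
      rw [h b x List.mem_cons_self]
      exact ih _ (fun b y hy => h b y (List.mem_cons_of_mem _ hy))

theorem foldl_flatMap_step {α β γ : Type} (xs : List α) (g : α → List β)
    (step : γ → β → γ) (b : γ) :
    (xs.flatMap g).foldl step b = xs.foldl (fun b x => (g x).foldl step b) b := by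
  induction xs generalizing b with
  | nil => rfl
  | cons x xs ih => simp [List.flatMap_cons, List.foldl_append, ih]

theorem sum_mask_foldl (n : Nat) (P : Nat → Prop) [DecidablePred P] (f : Nat → Int) :
    ∀ c0 : Int, (List.range n).foldl (fun c j => if P j then c + f j else c) c0
      = c0 + ((List.range n).map (fun i => (if P i then (1 : Int) else 0) * f i)).sum := by
  induction n with
  | zero => simp
  | succ n ih =>
      intro c0
      rw [List.range_succ]
      simp only [List.foldl_append, List.map_append, List.sum_append, ih]
      simp only [List.foldl_cons, List.foldl_nil, List.map_cons, List.map_nil,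
        List.sum_cons, List.sum_nil]
      split <;> ring

-- the purchase list A builds by appending 0/1 is the 0/1 mask of the combo
theorem purchase_fold (chosen : List Int) (u0 : Int) :
    chosen.foldl (fun p r => if r ≥ u0 then p ++ [(1 : Int)] else p ++ [(0 : Int)]) []
      = chosen.map (fun r => if r ≥ u0 then (1 : Int) else 0) := by
  have hb : (fun (p : List Int) (r : Int) => if r ≥ u0 then p ++ [(1 : Int)] else p ++ [(0 : Int)])
      = fun p r => p ++ [if r ≥ u0 then (1 : Int) else 0] := by
    funext p r; split <;> rfl
  rw [hb, PySem.List.foldl_append_singleton_eq_map]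
  simp

-- A's per-user purchase total equals B's conditional accumulation
theorem cond_eq_cost (chosen prices : List Int) (u0 : Int) (hl : prices.length = chosen.length) :
    ((List.range prices.length).map (fun (i : Nat) =>
      PySem.List.pyGetD (chosen.map (fun r => if r ≥ u0 then (1 : Int) else 0)) (i : Int) 0
        * PySem.List.pyGetD prices (i : Int) 0)).sum
    = (List.range prices.length).foldl (fun (c : Int) (j : Nat) =>
        if PySem.List.pyGetD chosen (j : Int) 0 ≥ u0 then c + PySem.List.pyGetD prices (j : Int) 0 else c) 0 := by
  rw [sum_mask_foldl prices.length (fun j => PySem.List.pyGetD chosen (j : Int) 0 ≥ u0)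
    (fun j => PySem.List.pyGetD prices (j : Int) 0) 0]
  rw [zero_add]
  apply congrArg List.sum
  apply List.map_congr_left
  intro i hi
  have hi' : i < chosen.length := by
    simpa [hl] using List.mem_range.mp hi
  have hmask : PySem.List.pyGetD (chosen.map (fun r => if r ≥ u0 then (1 : Int) else 0)) (i : Int) 0
      = (if PySem.List.pyGetD chosen (i : Int) 0 ≥ u0 then (1 : Int) else 0) := by
    rw [PySem.List.pyGetD_natCast, PySem.List.pyGetD_natCast]
    rw [List.getD_eq_getElem?_getD, List.getD_eq_getElem?_getD]
    rw [List.getElem?_map, List.getElem?_eq_getElem hi']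
    rfl
  rw [hmask]

-- A computes each case pair exactly as B's per-combination evaluation
theorem case_eq_eval (users : List (List Int)) (emoticons chosen : List Int) :
    solCase users emoticons chosen
      = [(solAltEval users emoticons chosen).1, (solAltEval users emoticons chosen).2] := by
  unfold solCase solAltEval
  have hfold : ∀ (acc : Int × Int) (user : List Int),
      (let customer_rate := PySem.List.pyGetD user 0 0
       let customer_price := PySem.List.pyGetD user 1 0
       let price_lst := (List.range chosen.length).map (fun (i : Nat) =>
         PySem.Int.truncdiv (PySem.List.pyGetD emoticons (i : Int) 0 * (100 - PySem.List.pyGetD chosen (i : Int) 0)) 100)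
       let purchase := chosen.foldl (fun purchase rate_ =>
         if rate_ ≥ customer_rate then purchase ++ [(1 : Int)] else purchase ++ [(0 : Int)]) []
       let total_purchase := (List.range price_lst.length).map (fun (i : Nat) =>
         PySem.List.pyGetD purchase (i : Int) 0 * PySem.List.pyGetD price_lst (i : Int) 0)
       let cond := total_purchase.sum
       if cond ≥ customer_price then (acc.1 + 1, acc.2) else (acc.1, acc.2 + cond))
      = (let prices := solAltPrices emoticons chosen
         let cost := (List.range prices.length).foldl (fun (c : Int) (j : Nat) =>
           if PySem.List.pyGetD chosen (j : Int) 0 ≥ PySem.List.pyGetD user 0 0 then c + PySem.List.pyGetD prices (j : Int) 0 else c) 0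
         if cost ≥ PySem.List.pyGetD user 1 0 then (acc.1 + 1, acc.2) else (acc.1, acc.2 + cost)) := by
    intro acc user
    simp only [solAltPrices]
    rw [purchase_fold]
    rw [cond_eq_cost chosen _ (PySem.List.pyGetD user 0 0) (by simp)]
  exact congrArg (fun f => [(users.foldl f ((0 : Int), (0 : Int))).1, (users.foldl f ((0 : Int), (0 : Int))).2])
    (funext fun acc => funext fun user => hfold acc user)

theorem pyProductRepeat_ne_nil (xs : List Int) (hx : xs ≠ []) (n : Nat) :
    pyProductRepeat xs n ≠ [] := by
  induction n with
  | zero => simp [pyProductRepeat]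
  | succ n ih =>
      simp only [pyProductRepeat, ne_eq, List.flatMap_eq_nil_iff]
      intro h
      obtain ⟨x, hxm⟩ := List.exists_mem_of_ne_nil xs hx
      have := h x hxm
      simp [List.map_eq_nil_iff, ih] at this

-- B's recursion = fold of the step over the pairs of all combinations, in product order
theorem go_eq_foldl (users : List (List Int)) (emoticons : List Int) :
    ∀ (n : Nat) (chosen : List Int) (best : Option (Int × Int)),
    solAltGo users emoticons n chosen best
      = ((pyProductRepeat [10, 20, 30, 40] n).map
          (fun t => solAltEval users emoticons (chosen ++ t))).foldl solAltStep best := by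
  intro n
  induction n with
  | zero => intro chosen best; simp [solAltGo, pyProductRepeat]
  | succ n ih =>
      intro chosen best
      simp only [solAltGo, pyProductRepeat]
      rw [List.map_flatMap, foldl_flatMap_step]
      apply my_foldl_congr
      intro b r _hr
      rw [ih]
      simp [Function.comp_def, List.append_assoc]

theorem step_some (b p : Int × Int) :
    solAltStep (some b) p = some (ofLex (max (toLex b) (toLex p))) := by
  show (if b.1 < p.1 ∨ (b.1 = p.1 ∧ b.2 < p.2) then some p else some b)
      = some (ofLex (max (toLex b) (toLex p)))
  by_cases h : toLex b < toLex p
  · rw [if_pos (Prod.Lex.toLex_lt_toLex.mp h), max_eq_right (le_of_lt h)]; rfl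
  · rw [if_neg (fun hc => h (Prod.Lex.toLex_lt_toLex.mpr hc)),
      max_eq_left (not_lt.mp h)]; rfl

theorem foldl_step_some (ps : List (Int × Int)) :
    ∀ b : Int × Int, ps.foldl solAltStep (some b)
      = some (ofLex ((ps.map toLex).foldl max (toLex b))) := by
  induction ps with
  | nil => intro b; rfl
  | cons p ps ih =>
      intro b
      simp only [List.foldl_cons, List.map_cons, step_some, ih]
      rfl

-- the fold of the step from None returns an element whose key is maximal
theorem foldl_step_none_max (q : Int × Int) (rest : List (Int × Int)) :
    ∃ m : Int × Int, (q :: rest).foldl solAltStep none = some m ∧ m ∈ q :: rest ∧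
      ∀ p ∈ q :: rest, toLex p ≤ toLex m := by
  have h1 : (q :: rest).foldl solAltStep none = rest.foldl solAltStep (some q) := rfl
  rw [h1, foldl_step_some]
  refine ⟨ofLex ((rest.map toLex).foldl max (toLex q)), rfl, ?_, ?_⟩
  · apply List.mem_cons.mpr
    rcases PySem.List.foldl_max_mem (rest.map toLex) (toLex q) with h | h
    · left; exact congrArg ofLex h
    · right
      rcases List.mem_map.mp h with ⟨p, hp, hpe⟩
      have : ofLex ((rest.map toLex).foldl max (toLex q)) = p := by rw [← hpe]; rfl
      rw [this]; exact hp
  · intro p hp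
    have hle := PySem.List.le_foldl_max (rest.map toLex) (toLex q)
    show toLex p ≤ (rest.map toLex).foldl max (toLex q)
    rcases List.mem_cons.mp hp with h | h
    · rw [h]; exact hle.1
    · exact hle.2 (toLex p) (List.mem_map.mpr ⟨p, h, rfl⟩)

theorem solution_agrees (users : List (List Int)) (emoticons : List Int) :
    solution users emoticons = solution_alt users emoticons := by
  have hcase : (pyProductRepeat [10, 20, 30, 40] emoticons.length).foldl
      (fun cs rate => cs ++ [solCase users emoticons rate]) []
      = ((pyProductRepeat [10, 20, 30, 40] emoticons.length).map
          (solAltEval users emoticons)).map (fun p : Int × Int => [p.1, p.2]) := by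
    rw [PySem.List.foldl_append_singleton_eq_map, List.map_map]
    simp only [List.nil_append]
    exact List.map_congr_left (fun c _hc => case_eq_eval users emoticons c)
  have hgo : solAltGo users emoticons emoticons.length [] none
      = ((pyProductRepeat [10, 20, 30, 40] emoticons.length).map
          (solAltEval users emoticons)).foldl solAltStep none := by
    rw [go_eq_foldl]
    simp
  have hpne : (pyProductRepeat [10, 20, 30, 40] emoticons.length).map
      (solAltEval users emoticons) ≠ [] := by
    simp [List.map_eq_nil_iff, pyProductRepeat_ne_nil [10, 20, 30, 40] (by simp) emoticons.length]
  obtain ⟨q, rest, hqr⟩ := List.exists_cons_of_ne_nil hpne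
  obtain ⟨mB, hmB, hmBmem, hmBmax⟩ := foldl_step_none_max q rest
  show (((pyProductRepeat [10, 20, 30, 40] emoticons.length).foldl
      (fun cs rate => cs ++ [solCase users emoticons rate]) []).mergeSort (fun a b =>
        decide (toLex (PySem.List.pyGetD b 0 0, PySem.List.pyGetD b 1 0)
          ≤ toLex (PySem.List.pyGetD a 0 0, PySem.List.pyGetD a 1 0)))).headD []
    = (match solAltGo users emoticons emoticons.length [] none with
       | some p => [p.1, p.2]
       | none => [])
  rw [hcase, hgo, hqr, hmB]
  show (((q :: rest).map (fun p : Int × Int => [p.1, p.2])).mergeSort (fun a b =>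
      decide (toLex (PySem.List.pyGetD b 0 0, PySem.List.pyGetD b 1 0)
        ≤ toLex (PySem.List.pyGetD a 0 0, PySem.List.pyGetD a 1 0)))).headD []
    = [mB.1, mB.2]
  have hkey_pair : ∀ p : Int × Int,
      toLex (PySem.List.pyGetD [p.1, p.2] 0 0, PySem.List.pyGetD [p.1, p.2] 1 0) = toLex p := by
    intro p
    simp [PySem.List.pyGetD, PySem.List.pyGet?, PySem.List.pyIdx?]
  have hperm := List.mergeSort_perm ((q :: rest).map (fun p : Int × Int => [p.1, p.2]))
    (fun a b => decide (toLex (PySem.List.pyGetD b 0 0, PySem.List.pyGetD b 1 0)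
      ≤ toLex (PySem.List.pyGetD a 0 0, PySem.List.pyGetD a 1 0)))
  have hsne : ((q :: rest).map (fun p : Int × Int => [p.1, p.2])).mergeSort (fun a b =>
      decide (toLex (PySem.List.pyGetD b 0 0, PySem.List.pyGetD b 1 0)
        ≤ toLex (PySem.List.pyGetD a 0 0, PySem.List.pyGetD a 1 0))) ≠ [] := by
    intro h
    rw [h] at hperm
    simp at hperm
  obtain ⟨mA, tl, hsa⟩ := List.exists_cons_of_ne_nil hsne
  rw [hsa]
  have hmAmem : mA ∈ (q :: rest).map (fun p : Int × Int => [p.1, p.2]) := by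
    apply hperm.mem_iff.mp
    rw [hsa]; exact List.mem_cons_self
  obtain ⟨pA, hpAmem, hpAeq⟩ := List.mem_map.mp hmAmem
  have hpw := List.pairwise_mergeSort
    (le := fun (a b : List Int) => decide (toLex (PySem.List.pyGetD b 0 0, PySem.List.pyGetD b 1 0)
      ≤ toLex (PySem.List.pyGetD a 0 0, PySem.List.pyGetD a 1 0)))
    (fun a b c hab hbc => by
      simp only [decide_eq_true_eq] at *
      exact le_trans hbc hab)
    (fun a b => by
      simp only [Bool.or_eq_true, decide_eq_true_eq]
      exact le_total _ _)
    ((q :: rest).map (fun p : Int × Int => [p.1, p.2]))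
  rw [hsa] at hpw
  have hmax : ∀ y ∈ (q :: rest).map (fun p : Int × Int => [p.1, p.2]),
      toLex (PySem.List.pyGetD y 0 0, PySem.List.pyGetD y 1 0)
        ≤ toLex (PySem.List.pyGetD mA 0 0, PySem.List.pyGetD mA 1 0) := by
    intro y hy
    have hy' : y ∈ mA :: tl := by rw [← hsa]; exact hperm.symm.mem_iff.mp hy
    rcases List.mem_cons.mp hy' with h | h
    · rw [h]
    · have := (List.pairwise_cons.mp hpw).1 y h
      simpa using this
  have h1 : toLex pA ≤ toLex mB := hmBmax pA hpAmem
  have h2 : toLex mB ≤ toLex pA := by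
    have hmem : [mB.1, mB.2] ∈ (q :: rest).map (fun p : Int × Int => [p.1, p.2]) :=
      List.mem_map.mpr ⟨mB, hmBmem, rfl⟩
    have h := hmax _ hmem
    rw [hkey_pair] at h
    rw [← hpAeq, hkey_pair] at h
    exact h
  have hPA : pA = mB := congrArg ofLex (le_antisymm h1 h2)
  simp [← hpAeq, hPA, List.headD]

-- ===== VERDICT (by name: the statement is the Claim_ definition above) =====
theorem solution_spec : Claim_equal_solution := by
  intro users emoticons _hdom _hpre
  unfold Spec_solution
  exact solution_agrees users emoticons
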